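-- pv_equiv track=rewrite | github.com/mlynckat/mech-interp--style-in-transformer-activations | backend/src/steering/baseline_text_generation.py | split_data_into_chunks
-- ===== SOURCE A (Python) =====
-- def split_data_into_chunks(data: list, num_chunks: int) -> list:
--     """
--     Split data into contiguous chunks for multi-GPU processing.
--
--     Strategy: Contiguous chunk splitting
--     - Each GPU gets a contiguous block of data
--     - Preserves original indices for easy merging
--     - No inter-process communication needed
--     - Optimal for independent text generation tasks
--
--     Args:
--         data: List of items to split
--         num_chunks: Number of chunks (typically number of GPUs)
--
--     Returns:
--         List of (chunk_data, original_indices) tuples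
--     """
--     total_items = len(data)
--     chunk_size = total_items // num_chunks
--     remainder = total_items % num_chunks
--
--     chunks = []
--     start_idx = 0
--
--     for i in range(num_chunks):
--         # Distribute remainder items across first 'remainder' chunks
--         extra = 1 if i < remainder else 0
--         end_idx = start_idx + chunk_size + extra
--
--         chunk_data = data[start_idx:end_idx]
--         original_indices = list(range(start_idx, end_idx))
--         chunks.append((chunk_data, original_indices))
--
--         start_idx = end_idx
--
--     return chunks
-- ===== SOURCE B (Python) =====
-- def split_data_into_chunks(data: list, num_chunks: int) -> list:
--     """Build the result back-to-front: repeatedly peel the floor-sized last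
--     chunk (len(rest)//k, recomputed each step) off a shrinking tail copy,
--     then reverse."""
--     chunks = []
--     rest = list(data)
--     k = num_chunks
--     while k > 0:
--         size = len(rest) // k
--         cut = len(rest) - size
--         chunks.append((rest[cut:], list(range(cut, len(rest)))))
--         del rest[cut:]
--         k -= 1
--     chunks.reverse()
--     return chunks
-- ===== Notes on version B (the rewrite author's own statement) =====
-- stated objective: alternative
-- what changed: B builds the chunk list back-to-front: it repeatedly peels the floor-sized last chunk (len(rest)//k, recomputed each step) off a shrinking tail and reverses at the end, instead of A's forward loop with a running start index and explicit remainder distribution (no chunk_size/remainder pair, no accumulator of start indices).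
-- crash fix: On num_chunks == 0 A raises ZeroDivisionError; B's loop never runs and it returns []. — e.g. on split_data_into_chunks([1, 2], 0): A raises ZeroDivisionError, B returns []
import Mathlib
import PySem

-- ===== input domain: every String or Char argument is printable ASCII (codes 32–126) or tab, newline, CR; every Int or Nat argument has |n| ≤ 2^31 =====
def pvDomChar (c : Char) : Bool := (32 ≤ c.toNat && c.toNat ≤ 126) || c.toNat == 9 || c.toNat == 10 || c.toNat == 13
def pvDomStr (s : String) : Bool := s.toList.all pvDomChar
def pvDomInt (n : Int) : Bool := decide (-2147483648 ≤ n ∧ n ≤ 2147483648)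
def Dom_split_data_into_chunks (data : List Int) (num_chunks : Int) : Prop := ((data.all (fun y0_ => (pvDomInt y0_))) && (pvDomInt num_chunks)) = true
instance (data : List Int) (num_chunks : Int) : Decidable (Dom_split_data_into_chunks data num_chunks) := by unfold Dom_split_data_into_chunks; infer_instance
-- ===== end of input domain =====

-- B builds the chunk list back-to-front, repeatedly peeling the floor-sized last chunk off a shrinking tail (objective: alternative, same cost).

-- ===== PORT A =====
def split_data_into_chunks (data : List Int) (num_chunks : Int) : List (List Int × List Int) :=
  let total_items : Int := data.length
  let chunk_size := PySem.Int.floordiv total_items num_chunks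
  let remainder := PySem.Int.mod total_items num_chunks
  ((PySem.List.pyRange 0 num_chunks 1).foldl
    (fun (st : List (List Int × List Int) × Int) i =>
      let extra : Int := if i < remainder then 1 else 0
      let end_idx := st.2 + chunk_size + extra
      let chunk_data := PySem.List.slice data (some st.2) (some end_idx)
      let original_indices := PySem.List.pyRange st.2 end_idx 1
      (st.1 ++ [(chunk_data, original_indices)], end_idx))
    ([], 0)).1

-- ===== PORT B =====
-- B's while loop: state (chunks, rest, k); peel rest[cut:] with cut = len(rest) - len(rest)//k.
def pvGoB (chunks : List (List Int × List Int)) (rest : List Int) (k : Int) : List (List Int × List Int) :=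
  if h : 0 < k then
    let size := PySem.Int.floordiv (rest.length : Int) k
    let cut : Int := (rest.length : Int) - size
    pvGoB (chunks ++ [(PySem.List.slice rest (some cut) none, PySem.List.pyRange cut (rest.length : Int) 1)])
          (PySem.List.slice rest none (some cut)) (k - 1)
  else chunks
termination_by k.toNat
decreasing_by omega

def split_data_into_chunks_alt (data : List Int) (num_chunks : Int) : List (List Int × List Int) :=
  (pvGoB [] data num_chunks).reverse

-- ===== PRECONDITION & SPEC =====
-- Pre_ excludes only num_chunks = 0, where the Python A raises ZeroDivisionError.
def Pre_split_data_into_chunks (data : List Int) (num_chunks : Int) : Prop := num_chunks ≠ 0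
instance (data : List Int) (num_chunks : Int) : Decidable (Pre_split_data_into_chunks data num_chunks) := by unfold Pre_split_data_into_chunks; infer_instance
def pvWitness_split_data_into_chunks : List Int × Int := ([1, 2, 3, 4, 5], 2)
-- On num_chunks == 0 A raises ZeroDivisionError; B's loop never runs and it returns [].
def Raises_split_data_into_chunks (data : List Int) (num_chunks : Int) : Prop := num_chunks = 0
instance (data : List Int) (num_chunks : Int) : Decidable (Raises_split_data_into_chunks data num_chunks) := by unfold Raises_split_data_into_chunks; infer_instance
def pvRaiseWitness_split_data_into_chunks : List Int × Int := ([1, 2], 0)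
def pvRaiseWitnessOut_split_data_into_chunks : List (List Int × List Int) := []
def Spec_split_data_into_chunks (data : List Int) (num_chunks : Int) (out : List (List Int × List Int)) : Prop := out = split_data_into_chunks_alt data num_chunks
instance (data : List Int) (num_chunks : Int) (out : List (List Int × List Int)) : Decidable (Spec_split_data_into_chunks data num_chunks out) := by unfold Spec_split_data_into_chunks; infer_instance

-- ===== CLAIM (what is proved, stated in full; the proofs are below) =====
def Claim_equal_split_data_into_chunks : Prop := ∀ (data : List Int) (num_chunks : Int), Dom_split_data_into_chunks data num_chunks → Pre_split_data_into_chunks data num_chunks → Spec_split_data_into_chunks data num_chunks (split_data_into_chunks data num_chunks)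
def Claim_raises_split_data_into_chunks : Prop := (∀ (data : List Int) (num_chunks : Int), Dom_split_data_into_chunks data num_chunks → Raises_split_data_into_chunks data num_chunks → ¬ Pre_split_data_into_chunks data num_chunks) ∧ (Dom_split_data_into_chunks (pvRaiseWitness_split_data_into_chunks.1) (pvRaiseWitness_split_data_into_chunks.2) ∧ Raises_split_data_into_chunks (pvRaiseWitness_split_data_into_chunks.1) (pvRaiseWitness_split_data_into_chunks.2) ∧ split_data_into_chunks_alt (pvRaiseWitness_split_data_into_chunks.1) (pvRaiseWitness_split_data_into_chunks.2) = pvRaiseWitnessOut_split_data_into_chunks)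

-- ===== LEMMAS AND PROOFS =====

-- The canonical boundary of chunk i in a front-loaded balanced split.
def pvBound (cs rem i : Int) : Int := i * cs + min i rem

theorem pvBound_succ (cs rem i : Int) :
    pvBound cs rem (i + 1) = pvBound cs rem i + cs + (if i < rem then 1 else 0) := by
  unfold pvBound
  have h : (i + 1) * cs = i * cs + cs := by ring
  rw [h]
  split_ifs with hlt <;> omega

theorem pvBound_mono (cs rem i j : Int) (hcs : 0 ≤ cs) (hij : i ≤ j) :
    pvBound cs rem i ≤ pvBound cs rem j := by
  unfold pvBound
  exact add_le_add (mul_le_mul_of_nonneg_right hij hcs) (min_le_min hij le_rfl)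

theorem pvBound_zero (cs rem : Int) (hrem : 0 ≤ rem) : pvBound cs rem 0 = 0 := by
  unfold pvBound; omega

theorem pvBound_nonneg (cs rem i : Int) (hcs : 0 ≤ cs) (hrem : 0 ≤ rem) (hi : 0 ≤ i) :
    0 ≤ pvBound cs rem i := by
  have := pvBound_mono cs rem 0 i hcs hi
  rw [pvBound_zero cs rem hrem] at this
  exact this

-- Slicing the kept prefix is slicing the original, below the cut.
theorem pv_slice_take (xs : List Int) (t a b : Int) (ha : 0 ≤ a) (hb : 0 ≤ b) (hbt : b ≤ t) :
    PySem.List.slice (xs.take t.toNat) (some a) (some b) = PySem.List.slice xs (some a) (some b) := by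
  rw [PySem.List.slice_toNat (xs.take t.toNat) ha hb, PySem.List.slice_toNat xs ha hb,
      List.drop_take, List.take_take]
  congr 1
  omega

-- A's loop from chunk j onward, started at boundary j, appends exactly the canonical chunks.
theorem pvLoop_eq (data : List Int) (n cs rem : Int) :
    ∀ (m : Nat) (j : Int) (acc : List (List Int × List Int)), (n - j).toNat = m →
    ((PySem.List.pyRange j n 1).foldl
      (fun (st : List (List Int × List Int) × Int) i =>
        (st.1 ++ [(PySem.List.slice data (some st.2) (some (st.2 + cs + if i < rem then 1 else 0)),
                   PySem.List.pyRange st.2 (st.2 + cs + if i < rem then 1 else 0) 1)],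
         st.2 + cs + if i < rem then 1 else 0))
      (acc, pvBound cs rem j)).1
    = acc ++ (PySem.List.pyRange j n 1).map
        (fun i => (PySem.List.slice data (some (pvBound cs rem i)) (some (pvBound cs rem (i + 1))),
                   PySem.List.pyRange (pvBound cs rem i) (pvBound cs rem (i + 1)) 1)) := by
  intro m
  induction m with
  | zero =>
    intro j acc hm
    rw [PySem.List.pyRange_one_eq_nil (by omega)]
    simp
  | succ m ih =>
    intro j acc hm
    rw [PySem.List.pyRange_one_cons (by omega)]
    simp only [List.foldl_cons, List.map_cons]
    rw [← pvBound_succ cs rem j]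
    rw [ih (j + 1) _ (by omega)]
    simp

-- B's loop, given the characterization of the balanced split, produces the canonical chunks reversed.
theorem pvGoB_eq :
    ∀ (m : Nat) (rest : List Int) (k cs rem : Int) (acc : List (List Int × List Int)),
    k.toNat = m → 0 < k → (rest.length : Int) = k * cs + rem → 0 ≤ rem → rem < k → 0 ≤ cs →
    pvGoB acc rest k = acc ++ ((PySem.List.pyRange 0 k 1).map
      (fun i => (PySem.List.slice rest (some (pvBound cs rem i)) (some (pvBound cs rem (i + 1))),
                 PySem.List.pyRange (pvBound cs rem i) (pvBound cs rem (i + 1)) 1))).reverse := by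
  intro m
  induction m with
  | zero => intro rest k cs rem acc hm hk; omega
  | succ m ih =>
    intro rest k cs rem acc hm hk hn hrem0 hremk hcs
    rw [pvGoB, dif_pos hk]
    have hsize : PySem.Int.floordiv (rest.length : Int) k = cs := by
      rw [PySem.Int.floordiv_eq_ediv_of_pos hk, hn]
      rw [show k * cs + rem = rem + cs * k by ring,
          Int.add_mul_ediv_right rem cs (by omega), Int.ediv_eq_zero_of_lt hrem0 hremk]
      ring
    simp only [hsize]
    have hn0 : (0:Int) ≤ (rest.length : Int) := Int.natCast_nonneg _
    have hcut0 : (0:Int) ≤ (rest.length : Int) - cs := by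
      nlinarith [mul_le_mul_of_nonneg_right (by omega : (1:Int) ≤ k) hcs]
    have hbk1 : pvBound cs rem (k - 1) = (rest.length : Int) - cs := by
      unfold pvBound
      rw [min_eq_right (by omega : rem ≤ k - 1)]
      nlinarith
    have hbk : pvBound cs rem k = (rest.length : Int) := by
      unfold pvBound
      rw [min_eq_right (by omega : rem ≤ k)]
      omega
    -- the peeled head written with an explicit stop bound
    have hheadv : PySem.List.slice rest (some ((rest.length : Int) - cs)) none
        = PySem.List.slice rest (some ((rest.length : Int) - cs)) (some (rest.length : Int)) := by
      rw [PySem.List.slice_from rest hcut0, PySem.List.slice_toNat rest hcut0 hn0]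
      rw [show (rest.length : Int).toNat - ((rest.length : Int) - cs).toNat
            = (rest.drop ((rest.length : Int) - cs).toNat).length by simp]
      rw [List.take_length]
    have hrest' : PySem.List.slice rest none (some ((rest.length : Int) - cs))
        = rest.take ((rest.length : Int) - cs).toNat := PySem.List.slice_to rest hcut0
    have hlen' : ((rest.take ((rest.length : Int) - cs).toNat).length : Int)
        = (rest.length : Int) - cs := by
      simp
      omega
    have hsplit : (PySem.List.pyRange 0 k 1) = PySem.List.pyRange 0 (k - 1) 1 ++ [k - 1] := by
      rw [show k = (k - 1) + 1 by ring, PySem.List.pyRange_one_succ_right (by omega)]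
      ring_nf
    -- head = canonical last chunk F (k-1)
    have hhead : ((PySem.List.slice rest (some ((rest.length : Int) - cs)) none : List Int),
          PySem.List.pyRange ((rest.length : Int) - cs) (rest.length : Int) 1)
        = (PySem.List.slice rest (some (pvBound cs rem (k - 1))) (some (pvBound cs rem (k - 1 + 1))),
           PySem.List.pyRange (pvBound cs rem (k - 1)) (pvBound cs rem (k - 1 + 1)) 1) := by
      rw [show k - 1 + 1 = k by ring, hbk1, hbk, hheadv]
    by_cases hk1 : k = 1
    · -- k = 1: the recursion stops; one canonical chunk
      subst hk1
      rw [hrest', pvGoB, dif_neg (by omega : ¬ (0:Int) < 1 - 1)]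
      rw [hsplit]
      rw [PySem.List.pyRange_one_eq_nil (by omega : (1:Int) - 1 ≤ 0)]
      simp only [List.nil_append, List.map_cons, List.map_nil, List.reverse_cons,
        List.reverse_nil]
      rw [← hhead]
    · -- k ≥ 2: recurse on the kept prefix
      have hk2 : 2 ≤ k := by omega
      by_cases hlast : rem = k - 1
      · -- remainder fills every earlier chunk: recurse with cs + 1, 0
        have hrec := ih (rest.take ((rest.length : Int) - cs).toNat) (k - 1) (cs + 1) 0
            (acc ++ [((PySem.List.slice rest (some ((rest.length : Int) - cs)) none : List Int),
                      PySem.List.pyRange ((rest.length : Int) - cs) (rest.length : Int) 1)])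
            (by omega) (by omega)
            (by rw [hlen']; nlinarith) (le_refl 0) (by omega) (by omega)
        rw [hrest', hrec, hsplit, List.map_append, List.reverse_append, List.append_assoc]
        congr 1
        congr 1
        · simp only [List.map_cons, List.map_nil, List.reverse_cons, List.reverse_nil,
            List.nil_append]
          rw [hhead]
        · congr 1
          apply List.map_congr_left
          intro i hi
          rw [PySem.List.mem_pyRange_one] at hi
          have hb : ∀ x : Int, 0 ≤ x → x ≤ k - 1 → pvBound (cs + 1) 0 x = pvBound cs rem x := by
            intro x hx0 hxk
            unfold pvBound
            rw [min_eq_right hx0, min_eq_left (by omega : x ≤ rem)]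
            ring
          rw [hb i hi.1 (by omega), hb (i + 1) (by omega) (by omega)]
          rw [pv_slice_take rest _ _ _ (pvBound_nonneg cs rem i hcs hrem0 hi.1)
                (pvBound_nonneg cs rem (i + 1) hcs hrem0 (by omega))
                (by rw [← hbk1]; exact pvBound_mono cs rem (i + 1) (k - 1) hcs (by omega))]
      · -- remainder untouched: recurse with cs, rem
        have hrec := ih (rest.take ((rest.length : Int) - cs).toNat) (k - 1) cs rem
            (acc ++ [((PySem.List.slice rest (some ((rest.length : Int) - cs)) none : List Int),
                      PySem.List.pyRange ((rest.length : Int) - cs) (rest.length : Int) 1)])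
            (by omega) (by omega)
            (by rw [hlen']; nlinarith) hrem0 (by omega) hcs
        rw [hrest', hrec, hsplit, List.map_append, List.reverse_append, List.append_assoc]
        congr 1
        congr 1
        · simp only [List.map_cons, List.map_nil, List.reverse_cons, List.reverse_nil,
            List.nil_append]
          rw [hhead]
        · congr 1
          apply List.map_congr_left
          intro i hi
          rw [PySem.List.mem_pyRange_one] at hi
          rw [pv_slice_take rest _ _ _ (pvBound_nonneg cs rem i hcs hrem0 hi.1)
                (pvBound_nonneg cs rem (i + 1) hcs hrem0 (by omega))
                (by rw [← hbk1]; exact pvBound_mono cs rem (i + 1) (k - 1) hcs (by omega))]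

-- ===== VERDICT (by name: the statement is the Claim_ definition above) =====
theorem split_data_into_chunks_spec : Claim_equal_split_data_into_chunks := by
  intro data num_chunks _ hpre
  unfold Pre_split_data_into_chunks at hpre
  unfold Spec_split_data_into_chunks split_data_into_chunks split_data_into_chunks_alt
  simp only []
  set cs := PySem.Int.floordiv (data.length : Int) num_chunks with hcs
  set rem := PySem.Int.mod (data.length : Int) num_chunks with hrem
  by_cases hpos : 0 < num_chunks
  case neg =>
    rw [PySem.List.pyRange_one_eq_nil (by omega), pvGoB, dif_neg hpos]
    simp
  have hn0 : (0:Int) ≤ (data.length : Int) := Int.natCast_nonneg _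
  have hchar : (data.length : Int) = num_chunks * cs + rem := by
    have := PySem.Int.floordiv_mul_add_mod (data.length : Int) num_chunks
    rw [← hcs, ← hrem] at this
    linarith [this]
  have hrem0 : 0 ≤ rem := by
    rw [hrem, PySem.Int.mod_eq_emod_of_pos hpos]
    exact Int.emod_nonneg _ (by omega)
  have hremk : rem < num_chunks := by
    rw [hrem, PySem.Int.mod_eq_emod_of_pos hpos]
    exact Int.emod_lt_of_pos _ hpos
  have hcs0 : 0 ≤ cs := by
    rw [hcs, PySem.Int.floordiv_eq_ediv_of_pos hpos]
    exact Int.ediv_nonneg hn0 (by omega)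
  have keyA := pvLoop_eq data num_chunks cs rem (num_chunks - 0).toNat 0 [] rfl
  rw [pvBound_zero cs rem hrem0] at keyA
  rw [keyA]
  rw [pvGoB_eq num_chunks.toNat data num_chunks cs rem [] rfl hpos hchar hrem0 hremk hcs0]
  simp

@[simp] theorem split_data_into_chunks_raises : Claim_raises_split_data_into_chunks := by
  unfold Claim_raises_split_data_into_chunks
  constructor
  · intro data num_chunks _ hr
    unfold Raises_split_data_into_chunks at hr
    unfold Pre_split_data_into_chunks
    omega
  · refine ⟨by decide, by decide, ?_⟩
    show split_data_into_chunks_alt [1, 2] 0 = []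
    unfold split_data_into_chunks_alt
    rw [pvGoB, dif_neg (by omega : ¬ (0:Int) < 0)]
    rfl
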